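-- pv_equiv track=rewrite | github.com/alejandrotor2012/BlackJack | BlackJack_Classes.py | hand_converter
-- ===== SOURCE A (Python) =====
-- def hand_converter(hand):
--     #Function determining a player's/dealer's hand value. A hand argument is passed containing the hand that is to be converted into a numeric value
--     value_mapping = {'A':11,'2':2,'3':3,'4':4,'5':5,'6':6,'7':7,'8':8,'9':9,'10':10,'Jack':10,'Queen':10,'King':10}
--     card_values = ['A','2','3','4','5','6','7','8','9','10','Jack','Queen','King']
--     hand_value = 0
--     card_count = 0
-- #The for loop below looks for the cards in the hand argument passed in the 'card_values' list'. The found cards are then 'mapped' using the 'value_mapping' dictionary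
--     for card in card_values:
--         if (card in hand):
--             card_count = hand.count(card)
--             hand_value += value_mapping[card]*card_count
--     return hand_value
-- ===== SOURCE B (Python) =====
-- def card_value(card):
--     # Explicit branch table for one card; unknown card names are worth 0.
--     if card == 'A':
--         return 11
--     elif card == '2':
--         return 2
--     elif card == '3':
--         return 3
--     elif card == '4':
--         return 4
--     elif card == '5':
--         return 5
--     elif card == '6':
--         return 6
--     elif card == '7':
--         return 7
--     elif card == '8':
--         return 8
--     elif card == '9':
--         return 9
--     elif card == '10' or card == 'Jack' or card == 'Queen' or card == 'King':
--         return 10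
--     else:
--         return 0
--
-- def hand_converter(hand):
--     # One pass over the hand: map each card through the branch table and sum.
--     return sum(card_value(card) for card in hand)
-- ===== Notes on version B (the rewrite author's own statement) =====
-- stated objective: alternative
-- what changed: Replaces A's loop over the 13 card types (membership test plus a .count scan of the hand per type, with a dict lookup) by a single map-and-sum pass over the hand through an explicit per-card branch table, with no dict and no counting.
import Mathlib
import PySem

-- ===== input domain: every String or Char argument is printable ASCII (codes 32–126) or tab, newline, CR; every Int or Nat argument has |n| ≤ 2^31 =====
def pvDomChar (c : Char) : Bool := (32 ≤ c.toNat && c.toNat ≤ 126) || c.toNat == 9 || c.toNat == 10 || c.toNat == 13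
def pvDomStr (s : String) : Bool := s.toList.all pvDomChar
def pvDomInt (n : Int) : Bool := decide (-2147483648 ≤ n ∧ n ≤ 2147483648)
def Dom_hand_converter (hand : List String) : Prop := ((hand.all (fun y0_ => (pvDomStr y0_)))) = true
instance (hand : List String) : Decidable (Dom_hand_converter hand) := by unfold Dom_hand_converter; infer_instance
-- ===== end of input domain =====

-- B replaces A's scan over the 13 card types (dict + per-type .count) by a single
-- map-and-sum pass over the hand through an explicit per-card branch table.

-- ===== PORT A =====
-- the dict literal, built by insertion order as Python builds it
def pvValueMapping : PySem.Dict String Int :=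
  (((((((((((((PySem.Dict.empty.insert "A" 11).insert "2" 2).insert "3" 3).insert "4" 4).insert
    "5" 5).insert "6" 6).insert "7" 7).insert "8" 8).insert "9" 9).insert "10" 10).insert
    "Jack" 10).insert "Queen" 10).insert "King" 10)

def pvCardValues : List String :=
  ["A", "2", "3", "4", "5", "6", "7", "8", "9", "10", "Jack", "Queen", "King"]

-- state = (hand_value, card_count), exactly A's loop variables
def hand_converter (hand : List String) : Int :=
  (pvCardValues.foldl
    (fun (st : Int × Int) card =>
      if hand.contains card then
        let card_count : Int := (hand.count card : Int)
        (st.1 + pvValueMapping.getD card 0 * card_count, card_count)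
      else st)
    (0, 0)).1

-- ===== PORT B =====
-- Source B's card_value: an explicit if/elif branch table
def pvCardValue (card : String) : Int :=
  if card = "A" then 11
  else if card = "2" then 2
  else if card = "3" then 3
  else if card = "4" then 4
  else if card = "5" then 5
  else if card = "6" then 6
  else if card = "7" then 7
  else if card = "8" then 8
  else if card = "9" then 9
  else if card = "10" ∨ card = "Jack" ∨ card = "Queen" ∨ card = "King" then 10
  else 0

-- Source B's hand_converter: sum(card_value(card) for card in hand)
def hand_converter_alt (hand : List String) : Int :=
  (hand.map pvCardValue).sum

-- ===== PRECONDITION & SPEC =====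
def Spec_hand_converter (hand : List String) (out : Int) : Prop := out = hand_converter_alt hand
instance (hand : List String) (out : Int) : Decidable (Spec_hand_converter hand out) := by unfold Spec_hand_converter; infer_instance

-- ===== CLAIM (what is proved, stated in full; the proofs are below) =====
def Claim_equal_hand_converter : Prop := ∀ (hand : List String), Dom_hand_converter hand → Spec_hand_converter hand (hand_converter hand)

-- ===== LEMMAS AND PROOFS =====

-- B's branch table agrees with A's dict lookup (default 0) on every string
lemma cardValue_eq_getD (x : String) : pvCardValue x = pvValueMapping.getD x 0 := by
  unfold pvCardValue
  split_ifs with h1 h2 h3 h4 h5 h6 h7 h8 h9 h10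
  · subst h1; simp [pvValueMapping, PySem.Dict.getD_insert]
  · subst h2; simp [pvValueMapping, PySem.Dict.getD_insert]
  · subst h3; simp [pvValueMapping, PySem.Dict.getD_insert]
  · subst h4; simp [pvValueMapping, PySem.Dict.getD_insert]
  · subst h5; simp [pvValueMapping, PySem.Dict.getD_insert]
  · subst h6; simp [pvValueMapping, PySem.Dict.getD_insert]
  · subst h7; simp [pvValueMapping, PySem.Dict.getD_insert]
  · subst h8; simp [pvValueMapping, PySem.Dict.getD_insert]
  · subst h9; simp [pvValueMapping, PySem.Dict.getD_insert]
  · rcases h10 with rfl | rfl | rfl | rfl <;>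
      simp [pvValueMapping, PySem.Dict.getD_insert]
  · push Not at h10
    obtain ⟨g1, g2, g3, g4⟩ := h10
    simp [pvValueMapping, PySem.Dict.getD_insert, PySem.Dict.getD_empty,
      h1, h2, h3, h4, h5, h6, h7, h8, h9, g1, g2, g3, g4]

-- A's fold over the card types computes the sum of value*count, for any accumulator
lemma foldA (cv : List String) (hand : List String) (a b : Int) :
    (cv.foldl
      (fun (st : Int × Int) card =>
        if hand.contains card then
          (st.1 + pvValueMapping.getD card 0 * (hand.count card : Int), (hand.count card : Int))
        else st)
      (a, b)).1
    = a + (cv.map (fun c => pvValueMapping.getD c 0 * (hand.count c : Int))).sum := by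
  induction cv generalizing a b with
  | nil => simp
  | cons c cs ih =>
    rw [List.foldl_cons]
    by_cases h : hand.contains c
    · rw [if_pos h, ih, List.map_cons, List.sum_cons]
      ring
    · have hc : hand.count c = 0 :=
        List.count_eq_zero.mpr (by simpa using h)
      rw [if_neg h, ih, List.map_cons, List.sum_cons, hc]
      push_cast
      ring

-- cards not among the 13 types look up to the default 0
lemma getD_notin (x : String) (hx : x ∉ pvCardValues) : pvValueMapping.getD x 0 = 0 := by
  simp [pvCardValues, List.mem_cons] at hx
  obtain ⟨h1, h2, h3, h4, h5, h6, h7, h8, h9, h10, h11, h12, h13⟩ := hx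
  simp [pvValueMapping, PySem.Dict.getD_insert, PySem.Dict.getD_empty,
    h1, h2, h3, h4, h5, h6, h7, h8, h9, h10, h11, h12, h13]

-- the delta sum: summing value[c] * [c = x] over distinct card types picks out value[x]
lemma delta (cv : List String) (x : String) (hnd : cv.Nodup)
    (hz : x ∉ cv → pvValueMapping.getD x 0 = 0) :
    (cv.map (fun c => pvValueMapping.getD c 0 * (if x == c then (1 : Int) else 0))).sum
      = pvValueMapping.getD x 0 := by
  induction cv with
  | nil => simpa using (hz (by simp)).symm
  | cons c cs ih =>
    rw [List.map_cons, List.sum_cons]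
    by_cases hxc : x = c
    · subst hxc
      have hxs : x ∉ cs := (List.nodup_cons.mp hnd).1
      have hrest : (cs.map (fun c => pvValueMapping.getD c 0 * (if x == c then (1 : Int) else 0))).sum = 0 := by
        apply List.sum_eq_zero
        intro y hy
        obtain ⟨c', hc', rfl⟩ := List.mem_map.mp hy
        have hne : ¬ ((x == c') = true) := by
          simp only [beq_iff_eq]
          exact fun h => hxs (h ▸ hc')
        rw [if_neg hne]
        ring
      rw [hrest, if_pos (by simp)]
      ring
    · have hne : ¬ ((x == c) = true) := by simpa using hxc
      rw [if_neg hne]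
      have := ih (List.nodup_cons.mp hnd).2 (fun h => hz (by simp [hxc, h]))
      rw [this]
      ring

-- the type-indexed sum equals the per-card sum
lemma sum_counts (cv : List String) (hand : List String) (hnd : cv.Nodup)
    (hz : ∀ x, x ∉ cv → pvValueMapping.getD x 0 = 0) :
    (cv.map (fun c => pvValueMapping.getD c 0 * (hand.count c : Int))).sum
      = (hand.map (fun x => pvValueMapping.getD x 0)).sum := by
  induction hand with
  | nil => simp
  | cons x h ih =>
    have hcount : ∀ c : String, ((x :: h).count c : Int)
        = (h.count c : Int) + (if x == c then (1 : Int) else 0) := by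
      intro c
      rw [List.count_cons]
      split <;> simp
    have hsplit :
        (cv.map (fun c => pvValueMapping.getD c 0 * ((x :: h).count c : Int))).sum
          = (cv.map (fun c => pvValueMapping.getD c 0 * (h.count c : Int))).sum
            + (cv.map (fun c => pvValueMapping.getD c 0 * (if x == c then (1 : Int) else 0))).sum := by
      rw [← List.sum_map_add]
      apply congrArg
      apply List.map_congr_left
      intro c _
      rw [hcount c]
      ring
    rw [hsplit, ih, delta cv x hnd (hz x), List.map_cons, List.sum_cons]
    ring

theorem hand_eq (hand : List String) : hand_converter hand = hand_converter_alt hand := by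
  unfold hand_converter hand_converter_alt
  rw [foldA pvCardValues hand 0 0]
  rw [sum_counts pvCardValues hand (by decide) (fun x hx => getD_notin x hx)]
  rw [zero_add]
  apply congrArg
  apply List.map_congr_left
  intro x _
  exact (cardValue_eq_getD x).symm

-- ===== VERDICT (by name: the statement is the Claim_ definition above) =====
theorem hand_converter_spec : Claim_equal_hand_converter := by
  intro hand _
  exact hand_eq hand
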